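-- pv_equiv track=rewrite | github.com/richardzhuang0412/mini-swe-agent-automate-repo-installation | repo_to_dockerfile.py | detect_base_image_from_commands
-- ===== SOURCE A (Python) =====
-- from typing import List, Dict, Any
--
-- def detect_base_image_from_commands(commands: List[str]) -> str:
--     """Analyze commands to determine appropriate Docker base image."""
--
--     # Language/runtime indicators in commands
--     language_indicators = {
--         "python": ["pip", "python", "python3", "requirements.txt", "setup.py", "poetry", "pipenv"],
--         "node": ["npm", "yarn", "node", "package.json", "typescript", "ts-node"],
--         "go": ["go ", "go.mod", "go.sum"],
--         "rust": ["cargo", "Cargo.toml", "rustc"],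
--         "java": ["mvn", "maven", "gradle", "java", "javac", ".jar"],
--         "ruby": ["gem", "bundle", "ruby", "Gemfile"],
--         "php": ["composer", "php"],
--         "dotnet": ["dotnet", ".csproj", ".sln"],
--     }
--
--     detected_languages = []
--     command_text = " ".join(commands).lower()
--
--     for language, indicators in language_indicators.items():
--         if any(indicator in command_text for indicator in indicators):
--             detected_languages.append(language)
--
--     # Choose base image based on detected language
--     if "python" in detected_languages:
--         return "python:3.11-slim"
--     elif "node" in detected_languages:
--         return "node:18-slim"
--     elif "go" in detected_languages:
--         return "golang:1.21-alpine"
--     elif "rust" in detected_languages: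
--         return "rust:1.70-slim"
--     elif "java" in detected_languages:
--         return "openjdk:17-slim"
--     elif "ruby" in detected_languages:
--         return "ruby:3.2-slim"
--     elif "php" in detected_languages:
--         return "php:8.2-cli"
--     elif "dotnet" in detected_languages:
--         return "mcr.microsoft.com/dotnet/sdk:7.0"
--     else:
--         # Default to Ubuntu if we can't determine the language
--         return "ubuntu:22.04"
-- ===== SOURCE B (Python) =====
-- from typing import List
--
-- # Flattened (indicator, priority-rank) pairs; rank indexes _IMAGES.
-- _INDICATOR_RANKS = [
--     ("pip", 0), ("python", 0), ("python3", 0), ("requirements.txt", 0),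
--     ("setup.py", 0), ("poetry", 0), ("pipenv", 0),
--     ("npm", 1), ("yarn", 1), ("node", 1), ("package.json", 1),
--     ("typescript", 1), ("ts-node", 1),
--     ("go ", 2), ("go.mod", 2), ("go.sum", 2),
--     ("cargo", 3), ("Cargo.toml", 3), ("rustc", 3),
--     ("mvn", 4), ("maven", 4), ("gradle", 4), ("java", 4), ("javac", 4), (".jar", 4),
--     ("gem", 5), ("bundle", 5), ("ruby", 5), ("Gemfile", 5),
--     ("composer", 6), ("php", 6),
--     ("dotnet", 7), (".csproj", 7), (".sln", 7),
-- ]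
--
-- _IMAGES = [
--     "python:3.11-slim", "node:18-slim", "golang:1.21-alpine", "rust:1.70-slim",
--     "openjdk:17-slim", "ruby:3.2-slim", "php:8.2-cli",
--     "mcr.microsoft.com/dotnet/sdk:7.0", "ubuntu:22.04",
-- ]
--
-- # Indicator pairs bucketed by their first character (insertion order kept).
-- _BY_FIRST = {}
-- for _ind, _rank in _INDICATOR_RANKS:
--     _BY_FIRST.setdefault(_ind[0], []).append((_ind, _rank))
--
-- def detect_base_image_from_commands(commands: List[str]) -> str:
--     """Analyze commands to determine appropriate Docker base image."""
--     text = " ".join(commands).lower()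
--     best = 8  # rank of the default image
--     for i in range(len(text)):
--         for indicator, rank in _BY_FIRST.get(text[i], ()):
--             if rank < best and text.startswith(indicator, i):
--                 best = rank
--     return _IMAGES[best]
-- ===== Notes on version B (the rewrite author's own statement) =====
-- stated objective: alternative
-- what changed: B replaces A's per-language substring-membership tests plus collect-then-elif cascade with a single left-to-right scan over the positions of the joined lowercased text, checking only the indicators bucketed under the current character (a first-char dict) and maintaining the minimum priority rank matched so far, finally indexing an image table by that rank; there is no 'in' test, no detected-language list and no elif chain.
import Mathlib
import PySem

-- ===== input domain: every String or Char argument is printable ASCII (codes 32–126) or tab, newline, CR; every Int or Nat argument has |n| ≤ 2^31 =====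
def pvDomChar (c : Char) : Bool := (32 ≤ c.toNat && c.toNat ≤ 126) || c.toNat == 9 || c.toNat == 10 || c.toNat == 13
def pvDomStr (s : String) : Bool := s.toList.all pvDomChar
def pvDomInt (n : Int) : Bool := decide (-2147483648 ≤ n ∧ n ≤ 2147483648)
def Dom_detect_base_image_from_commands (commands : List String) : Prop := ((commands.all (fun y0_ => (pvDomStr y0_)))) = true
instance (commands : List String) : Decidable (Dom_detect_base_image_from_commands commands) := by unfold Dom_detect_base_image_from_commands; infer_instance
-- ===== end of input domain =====

-- B replaces A's collect-then-elif substring detection with a single positional scan of the text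
-- keeping the minimum matched priority rank, then indexes an image table (objective: alternative).


-- ===== PORT A =====
def detect_base_image_from_commands (commands : List String) : String :=
  let language_indicators : List (String × List String) :=
    [("python", ["pip", "python", "python3", "requirements.txt", "setup.py", "poetry", "pipenv"]),
     ("node", ["npm", "yarn", "node", "package.json", "typescript", "ts-node"]),
     ("go", ["go ", "go.mod", "go.sum"]),
     ("rust", ["cargo", "Cargo.toml", "rustc"]),
     ("java", ["mvn", "maven", "gradle", "java", "javac", ".jar"]),
     ("ruby", ["gem", "bundle", "ruby", "Gemfile"]),
     ("php", ["composer", "php"]),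
     ("dotnet", ["dotnet", ".csproj", ".sln"])]
  let command_text := PySem.Str.lower (PySem.Str.join " " commands)
  let detected_languages := language_indicators.foldl
    (fun acc li =>
      if li.2.any (fun indicator => PySem.Str.isIn indicator command_text) then acc ++ [li.1] else acc)
    []
  if detected_languages.contains "python" then "python:3.11-slim"
  else if detected_languages.contains "node" then "node:18-slim"
  else if detected_languages.contains "go" then "golang:1.21-alpine"
  else if detected_languages.contains "rust" then "rust:1.70-slim"
  else if detected_languages.contains "java" then "openjdk:17-slim"
  else if detected_languages.contains "ruby" then "ruby:3.2-slim"
  else if detected_languages.contains "php" then "php:8.2-cli"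
  else if detected_languages.contains "dotnet" then "mcr.microsoft.com/dotnet/sdk:7.0"
  else "ubuntu:22.04"

-- ===== PORT B =====
-- _INDICATOR_RANKS: flattened (indicator, priority-rank) pairs, as char lists.
def pvIndicatorRanks : List (List Char × Nat) :=
  [("pip".toList, 0), ("python".toList, 0), ("python3".toList, 0), ("requirements.txt".toList, 0),
   ("setup.py".toList, 0), ("poetry".toList, 0), ("pipenv".toList, 0),
   ("npm".toList, 1), ("yarn".toList, 1), ("node".toList, 1), ("package.json".toList, 1),
   ("typescript".toList, 1), ("ts-node".toList, 1),
   ("go ".toList, 2), ("go.mod".toList, 2), ("go.sum".toList, 2),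
   ("cargo".toList, 3), ("Cargo.toml".toList, 3), ("rustc".toList, 3),
   ("mvn".toList, 4), ("maven".toList, 4), ("gradle".toList, 4), ("java".toList, 4),
   ("javac".toList, 4), (".jar".toList, 4),
   ("gem".toList, 5), ("bundle".toList, 5), ("ruby".toList, 5), ("Gemfile".toList, 5),
   ("composer".toList, 6), ("php".toList, 6),
   ("dotnet".toList, 7), (".csproj".toList, 7), (".sln".toList, 7)]

-- _IMAGES
def pvImages : List String :=
  ["python:3.11-slim", "node:18-slim", "golang:1.21-alpine", "rust:1.70-slim",
   "openjdk:17-slim", "ruby:3.2-slim", "php:8.2-cli",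
   "mcr.microsoft.com/dotnet/sdk:7.0", "ubuntu:22.04"]

-- inner loop: for indicator, rank in _BY_FIRST.get(text[i], ()) — the bucket holds the table's
-- pairs whose indicator starts with text[i], in table order, i.e. this filter (exact for i < len);
-- text.startswith(indicator, i) with 0 ≤ i is 'indicator is a prefix of the list with i dropped'.
def pvInner (cs : List Char) (i : Nat) (b : Nat) : Nat :=
  (pvIndicatorRanks.filter (fun p => p.1.head? == (cs.drop i).head?)).foldl
    (fun b p => if p.2 < b && PySem.Chars.startswith (cs.drop i) p.1 then p.2 else b) b

-- outer loop: for i in range(len(text)), starting from best = 8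
def pvBest (cs : List Char) : Nat :=
  (List.range cs.length).foldl (fun b i => pvInner cs i b) 8

def detect_base_image_from_commands_alt (commands : List String) : String :=
  let cs := (PySem.Str.lower (PySem.Str.join " " commands)).toList
  -- _IMAGES[best]; best ≤ 8 always, so the index is in range
  pvImages.getD (pvBest cs) "ubuntu:22.04"

-- ===== PRECONDITION & SPEC =====
def Spec_detect_base_image_from_commands (commands : List String) (out : String) : Prop := out = detect_base_image_from_commands_alt commands
instance (commands : List String) (out : String) : Decidable (Spec_detect_base_image_from_commands commands out) := by unfold Spec_detect_base_image_from_commands; infer_instance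

-- ===== CLAIM =====
def Claim_equal_detect_base_image_from_commands : Prop := ∀ (commands : List String), Dom_detect_base_image_from_commands commands → Spec_detect_base_image_from_commands commands (detect_base_image_from_commands commands)

-- ===== LEMMAS AND PROOFS =====

set_option maxRecDepth 16384

-- the 'any indicator in text' condition of rank r (A's per-language condition)
def pvLangAny (text : String) : Nat → Bool
  | 0 => (["pip", "python", "python3", "requirements.txt", "setup.py", "poetry", "pipenv"] : List String).any (fun indicator => PySem.Str.isIn indicator text)
  | 1 => (["npm", "yarn", "node", "package.json", "typescript", "ts-node"] : List String).any (fun indicator => PySem.Str.isIn indicator text)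
  | 2 => (["go ", "go.mod", "go.sum"] : List String).any (fun indicator => PySem.Str.isIn indicator text)
  | 3 => (["cargo", "Cargo.toml", "rustc"] : List String).any (fun indicator => PySem.Str.isIn indicator text)
  | 4 => (["mvn", "maven", "gradle", "java", "javac", ".jar"] : List String).any (fun indicator => PySem.Str.isIn indicator text)
  | 5 => (["gem", "bundle", "ruby", "Gemfile"] : List String).any (fun indicator => PySem.Str.isIn indicator text)
  | 6 => (["composer", "php"] : List String).any (fun indicator => PySem.Str.isIn indicator text)
  | 7 => (["dotnet", ".csproj", ".sln"] : List String).any (fun indicator => PySem.Str.isIn indicator text)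
  | _ => false

-- rank of the first language whose condition holds (8 = none)
def pvChainRank (text : String) : Nat :=
  if pvLangAny text 0 then 0 else if pvLangAny text 1 then 1
  else if pvLangAny text 2 then 2 else if pvLangAny text 3 then 3
  else if pvLangAny text 4 then 4 else if pvLangAny text 5 then 5
  else if pvLangAny text 6 then 6 else if pvLangAny text 7 then 7 else 8

theorem pvChain_le8 (text : String) : pvChainRank text ≤ 8 := by
  unfold pvChainRank; split_ifs <;> omega

theorem pvChain_lt (text : String) : ∀ r, r < pvChainRank text → pvLangAny text r = false := by
  unfold pvChainRank; split_ifs <;> intro r hr <;> interval_cases r <;> simp_all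

theorem pvChain_self (text : String) (h : pvChainRank text ≠ 8) :
    pvLangAny text (pvChainRank text) = true := by
  unfold pvChainRank at *; split_ifs at * <;> simp_all

-- generic lemmas about the min-rank fold update
theorem pvFold_le {α : Type} (f : α → Nat) (c : α → Bool) :
    ∀ (L : List α) (b : Nat),
      L.foldl (fun b x => if f x < b && c x then f x else b) b ≤ b := by
  intro L
  induction L with
  | nil => intro b; simp
  | cons y L ih =>
      intro b
      simp only [List.foldl]
      split_ifs with h
      · refine le_trans (ih _) ?_
        simp only [Bool.and_eq_true, decide_eq_true_eq] at h
        omega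
      · exact ih b

theorem pvFold_mem {α : Type} (f : α → Nat) (c : α → Bool) :
    ∀ (L : List α) (b : Nat),
      L.foldl (fun b x => if f x < b && c x then f x else b) b = b ∨
      ∃ x ∈ L, c x = true ∧ L.foldl (fun b x => if f x < b && c x then f x else b) b = f x := by
  intro L
  induction L with
  | nil => intro b; simp
  | cons y L ih =>
      intro b
      simp only [List.foldl]
      by_cases hy : (decide (f y < b) && c y) = true
      · rw [if_pos hy]
        rcases ih (f y) with h | ⟨x, hx, hc, he⟩
        · right
          refine ⟨y, List.mem_cons_self, ?_, h⟩
          simp only [Bool.and_eq_true] at hy; exact hy.2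
        · right; exact ⟨x, List.mem_cons_of_mem _ hx, hc, he⟩
      · rw [if_neg hy]
        rcases ih b with h | ⟨x, hx, hc, he⟩
        · left; exact h
        · right; exact ⟨x, List.mem_cons_of_mem _ hx, hc, he⟩

theorem pvFold_ub {α : Type} (f : α → Nat) (c : α → Bool) :
    ∀ (L : List α) (b : Nat) (x : α), x ∈ L → c x = true →
      L.foldl (fun b x => if f x < b && c x then f x else b) b ≤ f x := by
  intro L
  induction L with
  | nil => intro b x hx; simp at hx
  | cons y L ih =>
      intro b x hx hc
      simp only [List.foldl]
      rcases List.mem_cons.mp hx with rfl | hx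
      · refine le_trans (pvFold_le f c L _) ?_
        split_ifs with h
        · exact le_refl _
        · rw [hc, Bool.and_true] at h
          simp only [decide_eq_true_eq] at h
          omega
      · exact ih _ x hx hc

theorem pvIndNonempty : ∀ p ∈ pvIndicatorRanks, p.1 ≠ [] := by
  intro p hp; fin_cases hp <;> simp

-- a pair matching at position i lies in position i's first-char bucket
theorem pvMatch_bucket (cs : List Char) (i : Nat) (p : List Char × Nat)
    (hp : p ∈ pvIndicatorRanks) (hc : PySem.Chars.startswith (cs.drop i) p.1 = true) :
    p ∈ pvIndicatorRanks.filter (fun p => p.1.head? == (cs.drop i).head?) := by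
  obtain ⟨t, ht⟩ := (PySem.Chars.startswith_iff _ _).mp hc
  refine List.mem_filter.mpr ⟨hp, ?_⟩
  have hne := pvIndNonempty p hp
  cases hh : p.1 with
  | nil => exact absurd hh hne
  | cons a l => rw [← ht, hh]; simp

-- pvInner specialisations
theorem pvInner_le (cs : List Char) (i : Nat) (b : Nat) : pvInner cs i b ≤ b :=
  pvFold_le _ _ _ b

theorem pvInner_mem (cs : List Char) (i : Nat) (b : Nat) :
    pvInner cs i b = b ∨
    ∃ p ∈ pvIndicatorRanks, PySem.Chars.startswith (cs.drop i) p.1 = true ∧ pvInner cs i b = p.2 := by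
  rcases pvFold_mem (fun p : List Char × Nat => p.2)
      (fun p : List Char × Nat => PySem.Chars.startswith (cs.drop i) p.1)
      (pvIndicatorRanks.filter (fun p => p.1.head? == (cs.drop i).head?)) b with h | ⟨p, hp, hc, he⟩
  · left; exact h
  · right; exact ⟨p, (List.mem_filter.mp hp).1, hc, he⟩

theorem pvInner_ub (cs : List Char) (i : Nat) (b : Nat) (p : List Char × Nat)
    (hp : p ∈ pvIndicatorRanks) (hc : PySem.Chars.startswith (cs.drop i) p.1 = true) :
    pvInner cs i b ≤ p.2 :=
  pvFold_ub _ _ _ b p (pvMatch_bucket cs i p hp hc) hc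

-- outer fold properties, generic in the inner step
theorem pvOuterGen_le (g : Nat → Nat → Nat) (hg : ∀ b i, g b i ≤ b) :
    ∀ (L : List Nat) (b : Nat), L.foldl g b ≤ b := by
  intro L
  induction L with
  | nil => intro b; simp
  | cons j L ih =>
      intro b
      simp only [List.foldl]
      exact le_trans (ih _) (hg b j)

theorem pvOuterGen_mem {α : Type} (g : Nat → Nat → Nat) (S : List α) (f : α → Nat)
    (P : Nat → α → Prop) (hmem : ∀ b i, g b i = b ∨ ∃ p ∈ S, P i p ∧ g b i = f p) :
    ∀ (L : List Nat) (b : Nat),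
      L.foldl g b = b ∨ ∃ i ∈ L, ∃ p ∈ S, P i p ∧ L.foldl g b = f p := by
  intro L
  induction L with
  | nil => intro b; simp
  | cons j L ih =>
      intro b
      simp only [List.foldl]
      rcases ih (g b j) with h | ⟨i, hi, p, hp, hc, he⟩
      · rcases hmem b j with h2 | ⟨p, hp, hc, he⟩
        · left; omega
        · right; exact ⟨j, List.mem_cons_self, p, hp, hc, by omega⟩
      · right; exact ⟨i, List.mem_cons_of_mem _ hi, p, hp, hc, he⟩

theorem pvOuterGen_ub {α : Type} (g : Nat → Nat → Nat) (S : List α) (f : α → Nat)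
    (P : Nat → α → Prop) (hg : ∀ b i, g b i ≤ b)
    (hub : ∀ b i p, p ∈ S → P i p → g b i ≤ f p) :
    ∀ (L : List Nat) (b : Nat) (i : Nat), i ∈ L →
      ∀ p ∈ S, P i p → L.foldl g b ≤ f p := by
  intro L
  induction L with
  | nil => intro b i hi; simp at hi
  | cons j L ih =>
      intro b i hi p hp hc
      simp only [List.foldl]
      rcases List.mem_cons.mp hi with rfl | hi
      · exact le_trans (pvOuterGen_le g hg L _) (hub b i p hp hc)
      · exact ih _ i hi p hp hc

-- bridge: a pair matches at some scanned position iff its indicator occurs in the text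
theorem pvMatch_isIn (text : String) (p : List Char × Nat) (i : Nat)
    (hc : PySem.Chars.startswith (text.toList.drop i) p.1 = true) :
    PySem.Chars.isIn p.1 text.toList = true := by
  have hpre : p.1 <+: text.toList.drop i := (PySem.Chars.startswith_iff _ _).mp hc
  exact (PySem.Chars.exists_prefix_drop_iff_isIn _ _).mp ⟨i, hpre⟩

theorem pvIsIn_match (text : String) (p : List Char × Nat) (hp : p ∈ pvIndicatorRanks)
    (h : PySem.Chars.isIn p.1 text.toList = true) :
    ∃ i ∈ List.range text.toList.length,
      PySem.Chars.startswith (text.toList.drop i) p.1 = true := by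
  obtain ⟨j, hj⟩ := (PySem.Chars.exists_prefix_drop_iff_isIn _ _).mpr h
  have hjlt : j < text.toList.length := by
    by_contra hge
    have hnil : text.toList.drop j = [] := List.drop_eq_nil_of_le (by omega)
    rw [hnil] at hj
    exact pvIndNonempty p hp (List.prefix_nil.mp hj)
  exact ⟨j, List.mem_range.mpr hjlt, (PySem.Chars.startswith_iff _ _).mpr hj⟩

-- a matching pair implies its language's 'any' condition
theorem pvPair_lang (text : String) :
    ∀ p ∈ pvIndicatorRanks, PySem.Chars.isIn p.1 text.toList = true →
      pvLangAny text p.2 = true := by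
  intro p hp h
  fin_cases hp <;> simp [pvLangAny, PySem.Str.isIn] at h ⊢ <;> tauto

-- a true 'any' condition yields a matching pair of that rank
theorem pvLang_pair (text : String) (r : Nat) (hr : r < 8) (h : pvLangAny text r = true) :
    ∃ p ∈ pvIndicatorRanks, p.2 = r ∧ PySem.Chars.isIn p.1 text.toList = true := by
  interval_cases r <;>
  · obtain ⟨ind, hmem, hin⟩ := List.any_eq_true.mp h
    refine ⟨(ind.toList, _), ?_, rfl, by simpa [PySem.Str.isIn] using hin⟩
    fin_cases hmem <;> simp [pvIndicatorRanks]

theorem pvBest_eq_chain (text : String) : pvBest text.toList = pvChainRank text := by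
  have hg : ∀ (b i : Nat), pvInner text.toList i b ≤ b := fun b i => pvInner_le text.toList i b
  have hle8 : pvBest text.toList ≤ 8 :=
    pvOuterGen_le _ hg (List.range text.toList.length) 8
  have hge : pvChainRank text ≤ pvBest text.toList := by
    rcases pvOuterGen_mem (fun b i => pvInner text.toList i b) pvIndicatorRanks Prod.snd
        (fun i p => PySem.Chars.startswith (text.toList.drop i) p.1 = true)
        (fun b i => pvInner_mem text.toList i b)
        (List.range text.toList.length) 8 with h | ⟨i, _, p, hp, hc, he⟩
    · unfold pvBest; rw [h]; exact pvChain_le8 text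
    · have hisin := pvMatch_isIn text p i hc
      have hlang := pvPair_lang text p hp hisin
      have hnlt : ¬ p.2 < pvChainRank text := fun hlt => by
        have := pvChain_lt text p.2 hlt; simp_all
      unfold pvBest; omega
  have hle : pvBest text.toList ≤ pvChainRank text := by
    by_cases h8 : pvChainRank text = 8
    · omega
    · obtain ⟨p, hp, hrank, hisin⟩ :=
        pvLang_pair text (pvChainRank text) (by have := pvChain_le8 text; omega)
          (pvChain_self text h8)
      obtain ⟨i, hi, hc⟩ := pvIsIn_match text p hp hisin
      have := pvOuterGen_ub (fun b i => pvInner text.toList i b) pvIndicatorRanks Prod.snd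
        (fun i p => PySem.Chars.startswith (text.toList.drop i) p.1 = true) hg
        (fun b i p hp hc => pvInner_ub text.toList i b p hp hc)
        (List.range text.toList.length) 8 i hi p hp hc
      unfold pvBest; omega
  omega

-- the membership tests on the fold-built detected_languages list, in closed form
theorem pvContainsFold {α : Type} (P : α → Bool) (name : α → String) :
    ∀ (L : List α) (acc : List String) (s : String),
      (L.foldl (fun acc li => if P li then acc ++ [name li] else acc) acc).contains s =
        (acc.contains s || L.any (fun li => P li && (name li == s))) := by
  intro L
  induction L with
  | nil => intro acc s; simp
  | cons y L ih =>
      intro acc s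
      simp only [List.foldl, List.any_cons]
      by_cases hy : P y = true
      · rw [if_pos hy, ih, hy]
        by_cases hs : s = name y
        · simp [hs]
        · have hs' : ¬ name y = s := fun h => hs h.symm
          simp [hs, hs', BEq.beq]
      · rw [if_neg hy, ih]
        simp [Bool.eq_false_iff.mpr hy]

-- A's two-phase body equals the image table indexed by the chain rank
set_option maxHeartbeats 1000000 in
theorem pvChainKey (text : String) :
    (let detected_languages :=
       ([("python", ["pip", "python", "python3", "requirements.txt", "setup.py", "poetry", "pipenv"]),
         ("node", ["npm", "yarn", "node", "package.json", "typescript", "ts-node"]),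
         ("go", ["go ", "go.mod", "go.sum"]),
         ("rust", ["cargo", "Cargo.toml", "rustc"]),
         ("java", ["mvn", "maven", "gradle", "java", "javac", ".jar"]),
         ("ruby", ["gem", "bundle", "ruby", "Gemfile"]),
         ("php", ["composer", "php"]),
         ("dotnet", ["dotnet", ".csproj", ".sln"])] : List (String × List String)).foldl
        (fun acc li =>
          if li.2.any (fun indicator => PySem.Str.isIn indicator text) then acc ++ [li.1] else acc)
        []
     if detected_languages.contains "python" then "python:3.11-slim"
     else if detected_languages.contains "node" then "node:18-slim"
     else if detected_languages.contains "go" then "golang:1.21-alpine"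
     else if detected_languages.contains "rust" then "rust:1.70-slim"
     else if detected_languages.contains "java" then "openjdk:17-slim"
     else if detected_languages.contains "ruby" then "ruby:3.2-slim"
     else if detected_languages.contains "php" then "php:8.2-cli"
     else if detected_languages.contains "dotnet" then "mcr.microsoft.com/dotnet/sdk:7.0"
     else "ubuntu:22.04") = pvImages.getD (pvChainRank text) "ubuntu:22.04" := by
  simp only [pvContainsFold (fun li : String × List String =>
      li.2.any (fun indicator => PySem.Str.isIn indicator text)) Prod.fst,
    List.any_cons, List.any_nil, List.contains_nil, Bool.false_or, Bool.or_false]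
  simp only [pvChainRank, pvLangAny, List.any_cons, List.any_nil, Bool.or_false]
  simp only [String.reduceBEq, beq_self_eq_true, Bool.and_true, Bool.and_false, Bool.or_false, Bool.false_or]
  split_ifs <;> rfl

-- ===== VERDICT =====
theorem detect_base_image_from_commands_spec : Claim_equal_detect_base_image_from_commands := by
  intro commands _
  show detect_base_image_from_commands commands = detect_base_image_from_commands_alt commands
  have hB : detect_base_image_from_commands_alt commands =
      pvImages.getD (pvChainRank (PySem.Str.lower (PySem.Str.join " " commands))) "ubuntu:22.04" := by
    show pvImages.getD (pvBest (PySem.Str.lower (PySem.Str.join " " commands)).toList) "ubuntu:22.04" = _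
    rw [pvBest_eq_chain]
  rw [hB]
  exact pvChainKey (PySem.Str.lower (PySem.Str.join " " commands))
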